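-- pv_equiv track=rewrite | github.com/JowettC/IS1702-CT | week 2/1DArrayEx.py | t207
-- ===== SOURCE A (Python) =====
-- def t207(x1, x2):
--   # return sorted(x1 + x2)
--   joinedList = x1 + x2
--   lastAdded = joinedList[0]
--   res=[]
--   for i in range(len(joinedList)):
--     for num in joinedList:
--       if lastAdded > num:
--         lastAdded = num
--     joinedList.remove(lastAdded)
--     res.append(lastAdded)
--     if len(joinedList) > 0:
--       lastAdded = joinedList[0]
--   return res
-- ===== SOURCE B (Python) =====
-- def t207(x1, x2):
--   joined = x1 + x2
--   res = [joined[0]]          # IndexError on empty input, same as A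
--   for num in joined[1:]:
--     lo = 0
--     hi = len(res)
--     while lo < hi:           # binary search for the insertion point
--       mid = (lo + hi) // 2
--       if res[mid] <= num:
--         lo = mid + 1
--       else:
--         hi = mid
--     res.insert(lo, num)
--   return res
-- ===== Notes on version B (the rewrite author's own statement) =====
-- stated objective: faster
-- what changed: Selection sort by repeated min-scan and list.remove over the shrinking joined list is replaced by an insertion sort that grows a sorted prefix and finds each insertion point by hand-written binary search.
import Mathlib
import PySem

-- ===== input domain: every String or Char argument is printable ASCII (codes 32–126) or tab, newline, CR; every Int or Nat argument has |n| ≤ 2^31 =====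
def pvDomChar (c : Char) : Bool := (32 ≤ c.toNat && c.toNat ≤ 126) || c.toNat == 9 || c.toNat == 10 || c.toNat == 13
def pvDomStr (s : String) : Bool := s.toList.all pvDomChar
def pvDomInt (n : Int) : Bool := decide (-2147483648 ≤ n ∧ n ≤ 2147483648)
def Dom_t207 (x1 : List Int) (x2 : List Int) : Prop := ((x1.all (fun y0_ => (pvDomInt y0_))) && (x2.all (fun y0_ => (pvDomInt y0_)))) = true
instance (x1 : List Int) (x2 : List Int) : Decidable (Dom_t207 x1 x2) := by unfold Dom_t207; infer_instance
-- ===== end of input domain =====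

-- B replaces A's selection sort (repeated min-scan + remove) by a binary-insertion sort; measurably faster.

-- ===== PORT A =====
-- inner 'for num in joinedList: if lastAdded > num: lastAdded = num'
def pvFoldMin (la : Int) (jl : List Int) : Int :=
  jl.foldl (fun lastAdded num => if lastAdded > num then num else lastAdded) la

-- one iteration of A's outer loop; state = (joinedList, lastAdded, res)
def pvSelStep (st : List Int × Int × List Int) : List Int × Int × List Int :=
  let la := pvFoldMin st.2.1 st.1
  let jl' := (PySem.List.remove? st.1 la).getD st.1   -- ValueError unreachable: la is the minimum, present in st.1
  let res' := st.2.2 ++ [la]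
  let la' := (PySem.List.pyGet? jl' 0).getD la        -- 'if len(joinedList) > 0: lastAdded = joinedList[0]'
  (jl', la', res')

def t207 (x1 : List Int) (x2 : List Int) : List Int :=
  let joined := x1 ++ x2
  match PySem.List.pyGet? joined 0 with
  | none => []                                        -- IndexError on empty input; excluded by Pre_t207
  | some la0 =>
    ((PySem.List.pyRange 0 (joined.length : Int) 1).foldl
      (fun st _ => pvSelStep st) (joined, la0, [])).2.2

-- ===== PORT B =====
-- Source B's while-loop binary search (lo, hi, mid are nonnegative Python ints, so Nat; // on nonnegatives = Nat division;
-- res[mid] is always in range since mid < hi ≤ len(res), so pyGetD is exact here)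
def pvBisect (res : List Int) (num : Int) (lo hi : Nat) : Nat :=
  if lo < hi then
    let mid := (lo + hi) / 2
    if PySem.List.pyGetD res (mid : Int) 0 ≤ num then pvBisect res num (mid + 1) hi
    else pvBisect res num lo mid
  else lo
termination_by hi - lo
decreasing_by all_goals omega

def t207_alt (x1 : List Int) (x2 : List Int) : List Int :=
  let joined := x1 ++ x2
  match PySem.List.pyGet? joined 0 with
  | none => []                                        -- IndexError on empty input; excluded by Pre_t207
  | some h =>
    (PySem.List.slice joined (some 1) none).foldl
      (fun res num => PySem.List.insert res ((pvBisect res num 0 res.length : Nat) : Int) num) [h]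

-- ===== PRECONDITION & SPEC =====
-- Pre_ excludes only the empty concatenation, on which both A and B raise IndexError at joined[0].
def Pre_t207 (x1 : List Int) (x2 : List Int) : Prop := x1 ++ x2 ≠ []
instance (x1 : List Int) (x2 : List Int) : Decidable (Pre_t207 x1 x2) := by unfold Pre_t207; infer_instance
def pvWitness_t207 : List Int × List Int := ([3, 1], [2])

def Spec_t207 (x1 : List Int) (x2 : List Int) (out : List Int) : Prop := out = t207_alt x1 x2
instance (x1 : List Int) (x2 : List Int) (out : List Int) : Decidable (Spec_t207 x1 x2 out) := by unfold Spec_t207; infer_instance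

-- ===== CLAIM (what is proved, stated in full; the proofs are below) =====
def Claim_equal_t207 : Prop := ∀ (x1 : List Int) (x2 : List Int), Dom_t207 x1 x2 → Pre_t207 x1 x2 → Spec_t207 x1 x2 (t207 x1 x2)

-- ===== LEMMAS AND PROOFS =====

-- a foldl that ignores the list elements is function iteration
theorem pv_foldl_const {α β : Type} (f : β → β) (l : List α) (st : β) :
    l.foldl (fun s _ => f s) st = f^[l.length] st := by
  induction l generalizing st with
  | nil => rfl
  | cons a l ih => simp [List.foldl, ih, Function.iterate_succ_apply]

theorem pvFoldMin_mem (jl : List Int) : ∀ la, pvFoldMin la jl ∈ la :: jl := by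
  induction jl with
  | nil => intro la; simp [pvFoldMin]
  | cons b l ih =>
    intro la
    by_cases h : la > b
    · have := ih b; simp [pvFoldMin, List.foldl, h] at this ⊢
      rcases this with h' | h' <;> simp [h']
    · have := ih la; simp [pvFoldMin, List.foldl, h] at this ⊢
      rcases this with h' | h' <;> simp [h']

theorem pvFoldMin_le (jl : List Int) : ∀ la, pvFoldMin la jl ≤ la ∧ ∀ b ∈ jl, pvFoldMin la jl ≤ b := by
  induction jl with
  | nil => intro la; simp [pvFoldMin]
  | cons b l ih =>
    intro la
    by_cases h : la > b
    · have := ih b; simp [pvFoldMin, List.foldl, h] at this ⊢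
      exact ⟨le_of_lt (lt_of_le_of_lt this.1 h), this.1, this.2⟩
    · have := ih la; simp [pvFoldMin, List.foldl, h] at this ⊢
      exact ⟨this.1, le_trans this.1 (le_of_not_gt h), this.2⟩

-- invariant run of A's outer loop
theorem pv_selRun (n : Nat) : ∀ (jl : List Int) (la : Int) (res : List Int),
    jl.length = n → la ∈ jl → res.Pairwise (· ≤ ·) → (∀ a ∈ res, ∀ b ∈ jl, a ≤ b) →
    (pvSelStep^[n] (jl, la, res)).2.2.Perm (res ++ jl) ∧
      (pvSelStep^[n] (jl, la, res)).2.2.Pairwise (· ≤ ·) := by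
  induction n with
  | zero =>
    intro jl la res hlen hla hres hbound
    rw [List.length_eq_zero_iff] at hlen; subst hlen
    simp at hla
  | succ n ih =>
    intro jl la res hlen hla hres hbound
    rw [Function.iterate_succ_apply]
    have hmem : pvFoldMin la jl ∈ jl := by
      rcases List.mem_cons.mp (pvFoldMin_mem jl la) with h | h
      · rw [h]; exact hla
      · exact h
    set m := pvFoldMin la jl with hm
    have hmle : ∀ b ∈ jl, m ≤ b := (pvFoldMin_le jl la).2
    have hstep : pvSelStep (jl, la, res) =
        (jl.erase m, (PySem.List.pyGet? (jl.erase m) 0).getD m, res ++ [m]) := by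
      simp [pvSelStep, PySem.List.remove?_eq_some_erase jl m hmem, ← hm]
    rw [hstep]
    have hlen' : (jl.erase m).length = n := by
      rw [List.length_erase_of_mem hmem]; omega
    have hperm : jl.Perm (m :: jl.erase m) := List.perm_cons_erase hmem
    have hres' : (res ++ [m]).Pairwise (· ≤ ·) := by
      rw [List.pairwise_append]
      refine ⟨hres, List.pairwise_singleton _ _, fun a ha b hb => ?_⟩
      simp only [List.mem_singleton] at hb; subst hb
      exact hbound a ha m hmem
    have hsub : ∀ b ∈ jl.erase m, b ∈ jl := fun b hb => List.mem_of_mem_erase hb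
    have hbound' : ∀ a ∈ res ++ [m], ∀ b ∈ jl.erase m, a ≤ b := by
      intro a ha b hb
      rcases List.mem_append.mp ha with h | h
      · exact hbound a h b (hsub b hb)
      · simp only [List.mem_singleton] at h; subst h; exact hmle b (hsub b hb)
    rcases heq : jl.erase m with _ | ⟨h0, t0⟩
    · have hn : n = 0 := by rw [heq] at hlen'; simpa using hlen'.symm
      subst hn
      simp only [Function.iterate_zero, id_eq]
      refine ⟨?_, hres'⟩
      have hjl : jl.Perm [m] := by rw [heq] at hperm; simpa using hperm
      exact (List.Perm.append_left res hjl.symm).symm.symm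
    · have hla' : (PySem.List.pyGet? (h0 :: t0) 0).getD m = h0 := by
        simp
      rw [hla']
      have hlen2 : (h0 :: t0).length = n := by rw [← heq]; exact hlen'
      obtain ⟨ihp, ihs⟩ := ih (h0 :: t0) h0 (res ++ [m]) hlen2 (List.mem_cons_self)
        hres' (by rw [← heq]; exact hbound')
      refine ⟨?_, ihs⟩
      refine ihp.trans ?_
      have : (res ++ [m]) ++ (h0 :: t0) = res ++ (m :: (h0 :: t0)) := by simp
      rw [this, ← heq]
      exact List.Perm.append_left res hperm.symm

-- pvBisect's result is a correct insertion point in a sorted list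
theorem pv_bisect_spec (res : List Int) (num : Int) (hs : res.Pairwise (· ≤ ·)) :
    ∀ (d lo hi : Nat), hi - lo ≤ d → lo ≤ hi → hi ≤ res.length →
    (∀ i, i < lo → res.getD i 0 ≤ num) → (∀ j, hi ≤ j → j < res.length → num < res.getD j 0) →
    pvBisect res num lo hi ≤ res.length ∧
      (∀ i, i < pvBisect res num lo hi → res.getD i 0 ≤ num) ∧
      (∀ j, pvBisect res num lo hi ≤ j → j < res.length → num < res.getD j 0) := by
  have hmono : ∀ i j, i ≤ j → j < res.length → res.getD i 0 ≤ res.getD j 0 := by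
    intro i j hij hj
    rcases Nat.eq_or_lt_of_le hij with h | h
    · subst h; exact le_refl _
    · rw [List.getD_eq_getElem res 0 (by omega), List.getD_eq_getElem res 0 hj]
      exact List.pairwise_iff_getElem.mp hs i j (by omega) hj h
  intro d
  induction d with
  | zero =>
    intro lo hi hd hle hlen hlo hhi
    have : lo = hi := by omega
    rw [pvBisect]
    simp only [show ¬ lo < hi by omega, if_false]
    exact ⟨by omega, hlo, fun j hj hjl => hhi j (by omega) hjl⟩
  | succ d ihd =>
    intro lo hi hd hle hlen hlo hhi
    by_cases hlt : lo < hi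
    · rw [pvBisect]
      simp only [hlt, if_true]
      have hmid : lo ≤ (lo + hi) / 2 ∧ (lo + hi) / 2 < hi := by omega
      by_cases hc : PySem.List.pyGetD res (((lo + hi) / 2 : Nat) : Int) 0 ≤ num
      · simp only [hc, if_true]
        have hc' : res.getD ((lo + hi) / 2) 0 ≤ num := by
          rwa [PySem.List.pyGetD_natCast] at hc
        refine ihd ((lo + hi) / 2 + 1) hi (by omega) (by omega) hlen ?_ hhi
        intro i hi2
        exact le_trans (hmono i ((lo + hi) / 2) (by omega) (by omega)) hc'
      · simp only [hc, if_false]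
        have hc' : num < res.getD ((lo + hi) / 2) 0 := by
          rw [PySem.List.pyGetD_natCast] at hc; omega
        refine ihd lo ((lo + hi) / 2) (by omega) (by omega) (by omega) hlo ?_
        intro j hj hjl
        exact lt_of_lt_of_le hc' (hmono ((lo + hi) / 2) j hj hjl)
    · rw [pvBisect]
      simp only [hlt, if_false]
      have : lo = hi := by omega
      exact ⟨by omega, hlo, fun j hj hjl => hhi j (by omega) hjl⟩

-- inserting at pvBisect's point keeps the list sorted and adds the element
theorem pv_insert_bisect (res : List Int) (num : Int) (hs : res.Pairwise (· ≤ ·)) :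
    (PySem.List.insert res ((pvBisect res num 0 res.length : Nat) : Int) num).Perm (num :: res) ∧
      (PySem.List.insert res ((pvBisect res num 0 res.length : Nat) : Int) num).Pairwise (· ≤ ·) := by
  obtain ⟨hple, hlow, hhigh⟩ := pv_bisect_spec res num hs res.length 0 res.length
    (by omega) (by omega) (le_refl _) (by omega) (fun j hj hjl => by omega)
  set p := pvBisect res num 0 res.length with hp
  rw [PySem.List.insert_natCast res p num hple]
  have hgetlt : ∀ i (hi : i < p), res[i]'(lt_of_lt_of_le hi hple) ≤ num := by
    intro i hi
    have := hlow i hi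
    rwa [List.getD_eq_getElem res 0 (lt_of_lt_of_le hi hple)] at this
  have hgetge : ∀ j (hj : j < res.length), p ≤ j → num < res[j] := by
    intro j hj hpj
    have := hhigh j hpj hj
    rwa [List.getD_eq_getElem res 0 hj] at this
  constructor
  · have h1 : (res.take p ++ num :: res.drop p).Perm (num :: (res.take p ++ res.drop p)) :=
      List.perm_middle
    rwa [List.take_append_drop] at h1
  · rw [List.pairwise_append]
    refine ⟨List.Pairwise.sublist (List.take_sublist p res) hs, ?_, ?_⟩
    · rw [List.pairwise_cons]
      refine ⟨?_, List.Pairwise.sublist (List.drop_sublist p res) hs⟩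
      intro b hb
      obtain ⟨k, hk, hbk⟩ := List.mem_iff_getElem.mp hb
      rw [List.getElem_drop] at hbk
      subst hbk
      exact le_of_lt (hgetge (p + k) (by simp at hk; omega) (by omega))
    · intro a ha b hb
      obtain ⟨i, hi, hai⟩ := List.mem_iff_getElem.mp ha
      rw [List.getElem_take] at hai
      have hilt : i < p := by simp at hi; omega
      subst hai
      have h1 : res[i]'(by omega) ≤ num := hgetlt i hilt
      rcases List.mem_cons.mp hb with h | h
      · rw [h]; exact h1
      · obtain ⟨k, hk, hbk⟩ := List.mem_iff_getElem.mp h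
        rw [List.getElem_drop] at hbk
        subst hbk
        exact le_trans h1 (le_of_lt (hgetge (p + k) (by simp at hk; omega) (by omega)))

-- invariant run of B's loop
theorem pv_altRun (l : List Int) : ∀ (acc : List Int), acc.Pairwise (· ≤ ·) →
    (l.foldl (fun res num => PySem.List.insert res ((pvBisect res num 0 res.length : Nat) : Int) num) acc).Perm (acc ++ l) ∧
      (l.foldl (fun res num => PySem.List.insert res ((pvBisect res num 0 res.length : Nat) : Int) num) acc).Pairwise (· ≤ ·) := by
  induction l with
  | nil => intro acc h; simp [h]
  | cons a l ih =>
    intro acc h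
    obtain ⟨hp, hsrt⟩ := pv_insert_bisect acc a h
    obtain ⟨ihp, ihs⟩ := ih _ hsrt
    refine ⟨?_, ihs⟩
    refine ihp.trans ((hp.append_right l).trans ?_)
    exact List.perm_middle.symm

-- ===== VERDICT (by name: the statement is the Claim_ definition above) =====
theorem t207_spec : Claim_equal_t207 := by
  intro x1 x2 _ hpre
  unfold Spec_t207
  rcases hj : x1 ++ x2 with _ | ⟨h, t⟩
  · exact absurd hj hpre
  have hA : (t207 x1 x2).Perm (h :: t) ∧ (t207 x1 x2).Pairwise (· ≤ ·) := by
    have hrun := pv_selRun (h :: t).length (h :: t) h [] rfl List.mem_cons_self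
      (List.Pairwise.nil) (by simp)
    have heq : t207 x1 x2 = (pvSelStep^[(h :: t).length] (h :: t, h, [])).2.2 := by
      simp only [t207, hj, PySem.List.pyGet?_zero_cons]
      rw [pv_foldl_const, PySem.List.length_pyRange_one]
      norm_num
    rw [heq]
    simpa using hrun
  have hB : (t207_alt x1 x2).Perm (h :: t) ∧ (t207_alt x1 x2).Pairwise (· ≤ ·) := by
    have heq : t207_alt x1 x2 =
        t.foldl (fun res num =>
          PySem.List.insert res ((pvBisect res num 0 res.length : Nat) : Int) num) [h] := by
      simp only [t207_alt, hj, PySem.List.pyGet?_zero_cons, PySem.List.slice_from_one,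
        List.tail_cons]
    have hrun := pv_altRun t [h] (List.pairwise_singleton _ _)
    rw [heq]
    simpa using hrun
  exact List.Perm.eq_of_pairwise' hA.2 hB.2 (hA.1.trans hB.1.symm)
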